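-- pv_equiv track=rewrite | github.com/World-Ablaze/world-ablaze-beta | tools/ai_will_do_replacer_air_techs.py | get_reachable_archetypes
-- ===== SOURCE A (Python) =====
-- from typing import Optional
--
-- def get_reachable_archetypes(
--     tech_name: str,
--     tech_graph: dict[str, list[str]],
--     archetype_cache: dict[str, Optional[str]],
--     visited: Optional[set[str]] = None
-- ) -> set[str]:
--     """
--     Recursively find all archetype triggers reachable from a given technology.
--
--     Args:
--         tech_name: The technology to start from
--         tech_graph: Dictionary mapping tech_name -> list of child tech names
--         archetype_cache: Dictionary mapping tech_name -> trigger name (or None)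
--         visited: Set of already visited techs (for cycle detection)
--
--     Returns:
--         Set of trigger names (e.g., {"WA_AI_RESEARCH_needs_fighters", "WA_AI_RESEARCH_needs_multirole_fighters"})
--     """
--     if visited is None:
--         visited = set()
--
--     # Prevent infinite loops from circular references
--     if tech_name in visited:
--         return set()
--
--     visited.add(tech_name)
--     triggers = set()
--
--     # Add this tech's own archetype trigger if it has one
--     if tech_name in archetype_cache and archetype_cache[tech_name]:
--         triggers.add(archetype_cache[tech_name])
--
--     # Recursively check all children
--     if tech_name in tech_graph:
--         for child_tech in tech_graph[tech_name]:
--             child_triggers = get_reachable_archetypes(child_tech, tech_graph, archetype_cache, visited.copy())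
--             triggers.update(child_triggers)
--
--     return triggers
-- ===== SOURCE B (Python) =====
-- def get_reachable_archetypes(tech_name, tech_graph, archetype_cache, visited=None):
--     """Iterative explicit-stack DFS with ONE shared visited set: each tech is
--     expanded at most once, triggers accumulate into a single set, instead of
--     A's recursion that hands every child a visited.copy() and builds a fresh
--     result set per call.  (Side effect differs: like A it mutates a
--     caller-supplied `visited`, but it adds every visited tech rather than
--     just tech_name.)"""
--     if visited is None:
--         visited = set()
--     triggers = set()
--     stack = [tech_name]
--     while stack:
--         node = stack.pop()
--         if node in visited:
--             continue
--         visited.add(node)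
--         trig = archetype_cache.get(node)
--         if trig:
--             triggers.add(trig)
--         stack.extend(reversed(tech_graph.get(node, [])))
--     return triggers
-- ===== Notes on version B (the rewrite author's own statement) =====
-- stated objective: alternative
-- what changed: B replaces A's recursion that hands every child a visited.copy() and unions freshly-built per-call result sets with an iterative explicit-stack DFS threading one shared visited set and one trigger accumulator, so every tech is expanded at most once; on the measured input family the cost is the same.
import Mathlib
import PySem

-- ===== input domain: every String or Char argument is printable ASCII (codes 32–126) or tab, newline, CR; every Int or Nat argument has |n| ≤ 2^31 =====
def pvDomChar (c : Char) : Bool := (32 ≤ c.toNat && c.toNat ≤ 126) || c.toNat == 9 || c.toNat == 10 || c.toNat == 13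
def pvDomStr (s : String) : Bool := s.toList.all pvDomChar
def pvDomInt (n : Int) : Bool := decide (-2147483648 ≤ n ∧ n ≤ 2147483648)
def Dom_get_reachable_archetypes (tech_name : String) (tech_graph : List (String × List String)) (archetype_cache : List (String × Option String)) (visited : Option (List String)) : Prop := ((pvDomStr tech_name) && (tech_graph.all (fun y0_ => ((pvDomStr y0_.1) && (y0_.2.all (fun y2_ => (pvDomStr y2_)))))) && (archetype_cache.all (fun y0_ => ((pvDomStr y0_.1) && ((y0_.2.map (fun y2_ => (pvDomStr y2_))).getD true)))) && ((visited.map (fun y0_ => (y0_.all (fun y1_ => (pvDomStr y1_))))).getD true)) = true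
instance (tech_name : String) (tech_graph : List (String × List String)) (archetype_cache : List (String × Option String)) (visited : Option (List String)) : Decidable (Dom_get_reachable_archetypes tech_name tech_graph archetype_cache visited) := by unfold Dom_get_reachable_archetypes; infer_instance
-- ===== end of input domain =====

-- B replaces A's per-child visited.copy() recursion by an iterative explicit-stack DFS with one
-- shared visited set (objective: alternative). The proof is about the RETURN value only (both
-- Pythons mutate a caller-supplied `visited`: A adds tech_name, B adds every visited tech).


-- ===== PORT A =====
-- 'if tech_name in archetype_cache and archetype_cache[tech_name]: triggers.add(...)'
-- applied to the fresh 'triggers = set()' (None and "" are falsy).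
def pvTrigSetA (archetype_cache : List (String × Option String)) (tech_name : String) : List String :=
  match PySem.Dict.get? ⟨archetype_cache⟩ tech_name with
  | some (some s) => if s == "" then PySem.Set.empty else PySem.Set.add PySem.Set.empty s
  | _ => PySem.Set.empty

-- A's recursion, step for step.  The fuel (#dict entries + 1) is only a termination guard:
-- every recursive call is made with tech_name (a key of tech_graph) newly added to visited,
-- so the recursion depth never exceeds the number of graph keys + 1 and the 0-fuel branch is
-- unreachable from the entry point.  'visited.copy()' hands every child the same pure value
-- 'visited.add(tech_name)', which is how it is ported.
def pvRecA (tech_graph : List (String × List String)) (archetype_cache : List (String × Option String)) : Nat → String → List String → List String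
  | 0, _, _ => PySem.Set.empty
  | fuel+1, tech_name, visited =>
    if visited.contains tech_name then PySem.Set.empty
    else
      match PySem.Dict.get? ⟨tech_graph⟩ tech_name with
      | some children =>
          children.foldl
            (fun triggers child =>
              PySem.Set.update triggers
                (pvRecA tech_graph archetype_cache fuel child (PySem.Set.add visited tech_name)))
            (pvTrigSetA archetype_cache tech_name)
      | none => pvTrigSetA archetype_cache tech_name

def get_reachable_archetypes (tech_name : String) (tech_graph : List (String × List String)) (archetype_cache : List (String × Option String)) (visited : Option (List String)) : List String :=
  pvRecA tech_graph archetype_cache (tech_graph.length + 1) tech_name (visited.getD PySem.Set.empty)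

-- ===== PORT B =====
-- 'trig = archetype_cache.get(node); if trig: triggers.add(trig)'
def pvAddTrigB (archetype_cache : List (String × Option String)) (node : String) (triggers : List String) : List String :=
  match PySem.Dict.get? ⟨archetype_cache⟩ node with
  | some (some s) => if s == "" then triggers else PySem.Set.add triggers s
  | _ => triggers

-- termination measure of B's while loop: number of graph keys not yet visited, then stack size
def pvKeys (g : List (String × List String)) : List String := g.map Prod.fst
def pvMu (g : List (String × List String)) (vis : List String) : Nat :=
  ((pvKeys g).filter (fun k => !vis.contains k)).length

-- the two facts the loop's termination proof cites
lemma pvMu_le_of_subset {g : List (String × List String)} {v w : List String}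
    (h : ∀ x ∈ v, x ∈ w) : pvMu g w ≤ pvMu g v := by
  apply List.Sublist.length_le
  apply List.monotone_filter_right
  intro a ha
  have haw : a ∉ w := by simpa using ha
  have hav : a ∉ v := fun hv' => haw (h a hv')
  simpa using hav

lemma pvMu_lt_of_add {g : List (String × List String)} {v : List String} {n : String}
    (hk : n ∈ pvKeys g) (hv : n ∉ v) : pvMu g (PySem.Set.add v n) < pvMu g v := by
  unfold pvMu
  have hsub : ((pvKeys g).filter (fun k => !(PySem.Set.add v n).contains k)).Sublist
      ((pvKeys g).filter (fun k => !v.contains k)) := by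
    apply List.monotone_filter_right
    intro a ha
    have haw : a ∉ PySem.Set.add v n := by simpa using ha
    have hav : a ∉ v := fun hmem => haw ((PySem.Set.mem_add v n a).mpr (Or.inl hmem))
    simpa using hav
  refine lt_of_le_of_ne hsub.length_le (fun he => ?_)
  have heq := hsub.eq_of_length he
  have hmem : n ∈ (pvKeys g).filter (fun k => !v.contains k) := by
    refine List.mem_filter.mpr ⟨hk, by simpa using hv⟩
  rw [← heq] at hmem
  have h2 : n ∉ PySem.Set.add v n := by simpa using (List.mem_filter.mp hmem).2
  exact h2 ((PySem.Set.mem_add v n n).mpr (Or.inr rfl))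

lemma pvMu_add_lt_of_key {g : List (String × List String)} {v : List String} {n : String}
    {ch : List String} (hg : PySem.Dict.get? ⟨g⟩ n = some ch) (hv : n ∉ v) :
    pvMu g (PySem.Set.add v n) < pvMu g v := by
  refine pvMu_lt_of_add ?_ hv
  by_contra hn
  have h0 : PySem.Dict.get? (⟨g⟩ : PySem.Dict String (List String)) n = none := by
    rw [PySem.Dict.get?_eq_none_iff_not_mem_keys]
    simpa [PySem.Dict.keys, pvKeys] using hn
  rw [hg] at h0
  simp at h0

lemma pvMu_add_le {g : List (String × List String)} (v : List String) (n : String) :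
    pvMu g (PySem.Set.add v n) ≤ pvMu g v :=
  pvMu_le_of_subset (fun x hx => (PySem.Set.mem_add v n x).mpr (Or.inl hx))

-- B's while loop.  The Python list is a stack with its top at the END; here the stack is a
-- Lean list with its top at the HEAD, so 'stack.pop()' is taking the head and
-- 'stack.extend(reversed(children))' is putting the children (in order) in front of the rest.
def pvLoopB (g : List (String × List String)) (cache : List (String × Option String)) : List String → (List String × List String) → (List String × List String)
  | [], st => st
  | node :: rest, st =>
    if h : st.1.contains node then pvLoopB g cache rest st
    else
      pvLoopB g cache (PySem.Dict.getD ⟨g⟩ node [] ++ rest)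
        (PySem.Set.add st.1 node, pvAddTrigB cache node st.2)
termination_by stack st => (pvMu g st.1, stack.length)
decreasing_by
  · exact Prod.Lex.right _ (by simp)
  · rcases hg : PySem.Dict.get? (⟨g⟩ : PySem.Dict String (List String)) node with _ | ch
    · have hd : PySem.Dict.getD (⟨g⟩ : PySem.Dict String (List String)) node [] = [] := by
        rw [PySem.Dict.getD_eq_get?_getD, hg]; rfl
      have hle := pvMu_add_le (g := g) st.1 node
      rcases Nat.lt_or_ge (pvMu g (PySem.Set.add st.1 node)) (pvMu g st.1) with hlt | hge
      · exact Prod.Lex.left _ _ hlt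
      · have heq : pvMu g (PySem.Set.add st.1 node) = pvMu g st.1 := le_antisymm hle hge
        rw [heq, hd]
        exact Prod.Lex.right _ (by simp)
    · exact Prod.Lex.left _ _ (pvMu_add_lt_of_key hg (by simpa using h))

def get_reachable_archetypes_alt (tech_name : String) (tech_graph : List (String × List String)) (archetype_cache : List (String × Option String)) (visited : Option (List String)) : List String :=
  (pvLoopB tech_graph archetype_cache [tech_name] (visited.getD PySem.Set.empty, PySem.Set.empty)).2

-- ===== PRECONDITION & SPEC =====
def Spec_get_reachable_archetypes (tech_name : String) (tech_graph : List (String × List String)) (archetype_cache : List (String × Option String)) (visited : Option (List String)) (out : List String) : Prop := out = get_reachable_archetypes_alt tech_name tech_graph archetype_cache visited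
instance (tech_name : String) (tech_graph : List (String × List String)) (archetype_cache : List (String × Option String)) (visited : Option (List String)) (out : List String) : Decidable (Spec_get_reachable_archetypes tech_name tech_graph archetype_cache visited out) := by unfold Spec_get_reachable_archetypes; infer_instance

-- ===== CLAIM (what is proved, stated in full; the proofs are below) =====
def Claim_equal_get_reachable_archetypes : Prop := ∀ (tech_name : String) (tech_graph : List (String × List String)) (archetype_cache : List (String × Option String)) (visited : Option (List String)), Dom_get_reachable_archetypes tech_name tech_graph archetype_cache visited → Spec_get_reachable_archetypes tech_name tech_graph archetype_cache visited (get_reachable_archetypes tech_name tech_graph archetype_cache visited)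

-- ===== LEMMAS AND PROOFS =====

-- ---- proof-only abbreviations ----
def pvSucc (g : List (String × List String)) (n : String) : List String := PySem.Dict.getD ⟨g⟩ n []
-- every node of W outside vis has all its children inside W and its own trigger inside T
def pvClosed (g : List (String × List String)) (cache : List (String × Option String)) (vis W T : List String) : Prop :=
  ∀ u ∈ W, u ∉ vis → (∀ c ∈ pvSucc g u, c ∈ W) ∧ (∀ t ∈ pvTrigSetA cache u, t ∈ T)

-- PROOF-ONLY recursive DFS: A's recursion re-expressed with a threaded (visited, triggers)
-- state; the bridge between the two ports (pvLoopB flattens its call stack, pvVisitB_spec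
-- relates it to pvRecA).
def pvVisitB (tech_graph : List (String × List String)) (archetype_cache : List (String × Option String)) : Nat → String → (List String × List String) → (List String × List String)
  | 0, _, st => st
  | fuel+1, node, st =>
    if st.1.contains node then st
    else
      (PySem.Dict.getD ⟨tech_graph⟩ node []).foldl
        (fun st child => pvVisitB tech_graph archetype_cache fuel child st)
        (PySem.Set.add st.1 node, pvAddTrigB archetype_cache node st.2)

-- ---- small set lemmas (shapes specific to these two ports) ----
lemma pvUpdate_of_subset {s : PySem.Set String} {xs : List String} (h : ∀ t ∈ xs, t ∈ s) :
    PySem.Set.update s xs = s := by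
  rw [PySem.Set.update_eq_append_filter]
  have hnil : List.filter (fun y => !s.contains y) (PySem.Set.ofList xs) = [] := by
    rw [List.filter_eq_nil_iff]
    intro y hy
    have : y ∈ xs := (PySem.Set.mem_ofList xs y).mp hy
    simp [h y this]
  rw [hnil, List.append_nil]

lemma pvUpdate_add (a b : List String) (x : String) :
    PySem.Set.update a (PySem.Set.add b x) = PySem.Set.add (PySem.Set.update a b) x := by
  by_cases hx : x ∈ b
  · rw [PySem.Set.add_of_mem hx,
      PySem.Set.add_of_mem ((PySem.Set.mem_update a b x).mpr (Or.inr hx))]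
  · rw [PySem.Set.add_of_not_mem hx, PySem.Set.update_append, PySem.Set.update_cons,
      PySem.Set.update_nil]

lemma pvUpdate_update (a b c : List String) :
    PySem.Set.update a (PySem.Set.update b c) = PySem.Set.update (PySem.Set.update a b) c := by
  induction c generalizing b with
  | nil => rw [PySem.Set.update_nil, PySem.Set.update_nil]
  | cons x c ihc =>
    rw [PySem.Set.update_cons, ihc, pvUpdate_add, PySem.Set.update_cons]

lemma pvAddTrigB_eq (cache : List (String × Option String)) (n : String) (trig : List String) :
    pvAddTrigB cache n trig = PySem.Set.update trig (pvTrigSetA cache n) := by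
  unfold pvAddTrigB pvTrigSetA
  cases h : PySem.Dict.get? (⟨cache⟩ : PySem.Dict String (Option String)) n with
  | none =>
    show trig = PySem.Set.update trig PySem.Set.empty
    rw [PySem.Set.empty_eq, PySem.Set.update_nil]
  | some v =>
    cases v with
    | none =>
      show trig = PySem.Set.update trig PySem.Set.empty
      rw [PySem.Set.empty_eq, PySem.Set.update_nil]
    | some s =>
      show (if (s == "") = true then trig else PySem.Set.add trig s)
          = PySem.Set.update trig
              (if (s == "") = true then PySem.Set.empty else PySem.Set.add PySem.Set.empty s)
      by_cases hs : (s == "") = true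
      · rw [if_pos hs, if_pos hs, PySem.Set.empty_eq, PySem.Set.update_nil]
      · rw [if_neg hs, if_neg hs, PySem.Set.empty_eq,
          PySem.Set.add_of_not_mem (List.not_mem_nil), List.nil_append,
          PySem.Set.update_cons, PySem.Set.update_nil]

lemma pvMem_foldl_update (f : String → List String) (l : List String) (t0 : List String) (x : String) :
    x ∈ l.foldl (fun t c => PySem.Set.update t (f c)) t0 ↔ x ∈ t0 ∨ ∃ c ∈ l, x ∈ f c := by
  induction l generalizing t0 with
  | nil => simp
  | cons c l ihl =>
    simp only [List.foldl_cons, ihl, PySem.Set.mem_update, List.mem_cons]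
    constructor
    · rintro ((h | h) | ⟨d, hd, hh⟩)
      · exact Or.inl h
      · exact Or.inr ⟨c, Or.inl rfl, h⟩
      · exact Or.inr ⟨d, Or.inr hd, hh⟩
    · rintro (h | ⟨d, (rfl | hd), hh⟩)
      · exact Or.inl (Or.inl h)
      · exact Or.inl (Or.inr hh)
      · exact Or.inr ⟨d, hd, hh⟩

-- ---- graph lemmas ----
lemma pvMem_keys_of_get?_some {g : List (String × List String)} {n : String} {ch : List String}
    (h : PySem.Dict.get? ⟨g⟩ n = some ch) : n ∈ pvKeys g := by
  by_contra hn
  have h0 : PySem.Dict.get? (⟨g⟩ : PySem.Dict String (List String)) n = none := by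
    rw [PySem.Dict.get?_eq_none_iff_not_mem_keys]
    simpa [PySem.Dict.keys, pvKeys] using hn
  rw [h] at h0
  simp at h0

lemma pvSucc_of_get?_some {g : List (String × List String)} {n : String} {ch : List String}
    (h : PySem.Dict.get? ⟨g⟩ n = some ch) : pvSucc g n = ch := by
  unfold pvSucc
  rw [PySem.Dict.getD_eq_get?_getD, h]
  rfl

lemma pvSucc_of_get?_none {g : List (String × List String)} {n : String}
    (h : PySem.Dict.get? ⟨g⟩ n = none) : pvSucc g n = [] := by
  unfold pvSucc
  rw [PySem.Dict.getD_eq_get?_getD, h]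
  rfl

lemma pvTrigSetA_nodup (cache : List (String × Option String)) (n : String) :
    (pvTrigSetA cache n).Nodup := by
  unfold pvTrigSetA
  cases h : PySem.Dict.get? (⟨cache⟩ : PySem.Dict String (Option String)) n with
  | none => exact List.nodup_nil
  | some v =>
    cases v with
    | none => exact List.nodup_nil
    | some s =>
      show (if (s == "") = true then PySem.Set.empty
        else PySem.Set.add PySem.Set.empty s).Nodup
      by_cases hs : (s == "") = true
      · rw [if_pos hs]; exact List.nodup_nil
      · rw [if_neg hs, PySem.Set.empty_eq,
          PySem.Set.add_of_not_mem (List.not_mem_nil), List.nil_append]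
        simp

lemma pvRecA_nodup (g : List (String × List String)) (cache : List (String × Option String)) :
    ∀ fuel c vis, (pvRecA g cache fuel c vis).Nodup := by
  intro fuel
  induction fuel with
  | zero => intro c vis; simp [pvRecA, PySem.Set.empty_eq]
  | succ fuel ih =>
    intro c vis
    simp only [pvRecA]
    split
    · simp [PySem.Set.empty_eq]
    · cases hg : PySem.Dict.get? (⟨g⟩ : PySem.Dict String (List String)) c with
      | none => exact pvTrigSetA_nodup cache c
      | some ch =>
        have inner : ∀ (l : List String) (acc : List String), acc.Nodup →
            (l.foldl (fun t d => PySem.Set.update t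
              (pvRecA g cache fuel d (PySem.Set.add vis c))) acc).Nodup := by
          intro l
          induction l with
          | nil => intro acc h; simpa using h
          | cons d l ihl =>
            intro acc h
            simp only [List.foldl_cons]
            exact ihl _ (PySem.Set.nodup_update _ _ h)
        exact inner ch _ (pvTrigSetA_nodup cache c)

-- ---- S: inside a closed region, A's recursion produces nothing new ----
lemma pvRecA_mem_of_closed (g : List (String × List String)) (cache : List (String × Option String))
    (W T : List String) :
    ∀ fuel (vis : List String) (c : String), pvClosed g cache vis W T → c ∈ W →
      ∀ t ∈ pvRecA g cache fuel c vis, t ∈ T := by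
  intro fuel
  induction fuel with
  | zero => intro vis c _ _ t ht; simp [pvRecA, PySem.Set.empty_eq] at ht
  | succ fuel ih =>
    intro vis c hcl hcW t ht
    simp only [pvRecA] at ht
    by_cases hcv : c ∈ vis
    · rw [if_pos (List.contains_iff_mem.mpr hcv)] at ht
      simp [PySem.Set.empty_eq] at ht
    · rw [if_neg (by simpa using hcv)] at ht
      obtain ⟨hchild, htrg⟩ := hcl c hcW hcv
      cases hg : PySem.Dict.get? (⟨g⟩ : PySem.Dict String (List String)) c with
      | none => rw [hg] at ht; exact htrg t ht
      | some ch =>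
        rw [hg] at ht
        rw [pvMem_foldl_update (fun d => pvRecA g cache fuel d (PySem.Set.add vis c))
          ch (pvTrigSetA cache c) t] at ht
        rcases ht with ht | ⟨d, hd, htd⟩
        · exact htrg t ht
        · have hdW : d ∈ W := hchild d (by rw [pvSucc_of_get?_some hg]; exact hd)
          refine ih (PySem.Set.add vis c) d ?_ hdW t htd
          intro u hu hnv
          exact hcl u hu (fun huv => hnv ((PySem.Set.mem_add vis c u).mpr (Or.inl huv)))

-- ---- M: enlarging visited by a closed region does not change A's contribution ----
lemma pvRecA_update_ext (g : List (String × List String)) (cache : List (String × Option String)) :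
    ∀ fuel (c : String) (vis W T : List String),
      (∀ x ∈ vis, x ∈ W) → pvClosed g cache vis W T →
      PySem.Set.update T (pvRecA g cache fuel c vis)
        = PySem.Set.update T (pvRecA g cache fuel c W) := by
  intro fuel
  induction fuel with
  | zero => intro c vis W T _ _; rfl
  | succ fuel ih =>
    intro c vis W T hsub hcl
    by_cases hcv : c ∈ vis
    · have hcW : c ∈ W := hsub c hcv
      simp only [pvRecA]
      rw [if_pos (List.contains_iff_mem.mpr hcv), if_pos (List.contains_iff_mem.mpr hcW)]
    · by_cases hcW : c ∈ W
      · have hL : PySem.Set.update T (pvRecA g cache (fuel + 1) c vis) = T :=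
          pvUpdate_of_subset (pvRecA_mem_of_closed g cache W T (fuel + 1) vis c hcl hcW)
        have hR : pvRecA g cache (fuel + 1) c W = PySem.Set.empty := by
          simp only [pvRecA]
          rw [if_pos (List.contains_iff_mem.mpr hcW)]
        rw [hL, hR, PySem.Set.empty_eq, PySem.Set.update_nil]
      · simp only [pvRecA]
        rw [if_neg (by simpa using hcv), if_neg (by simpa using hcW)]
        cases hg : PySem.Dict.get? (⟨g⟩ : PySem.Dict String (List String)) c with
        | none => rfl
        | some ch =>
          have hsub' : ∀ x ∈ PySem.Set.add vis c, x ∈ PySem.Set.add W c := by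
            intro x hx
            rcases (PySem.Set.mem_add vis c x).mp hx with hx | rfl
            · exact (PySem.Set.mem_add W c x).mpr (Or.inl (hsub x hx))
            · exact (PySem.Set.mem_add W x x).mpr (Or.inr rfl)
          have inner : ∀ (l : List String) (X Y : List String),
              PySem.Set.update T X = PySem.Set.update T Y →
              PySem.Set.update T (l.foldl (fun t d => PySem.Set.update t
                  (pvRecA g cache fuel d (PySem.Set.add vis c))) X)
                = PySem.Set.update T (l.foldl (fun t d => PySem.Set.update t
                  (pvRecA g cache fuel d (PySem.Set.add W c))) Y) := by
            intro l
            induction l with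
            | nil => intro X Y h; simpa using h
            | cons d l ihl =>
              intro X Y h
              simp only [List.foldl_cons]
              apply ihl
              rw [pvUpdate_update, pvUpdate_update, h]
              apply ih d (PySem.Set.add vis c) (PySem.Set.add W c) (PySem.Set.update T Y) hsub'
              intro u huW' hnv'
              have huc : u ≠ c := by
                intro h'
                exact hnv' (h' ▸ (PySem.Set.mem_add vis c c).mpr (Or.inr rfl))
              have huW : u ∈ W := by
                rcases (PySem.Set.mem_add W c u).mp huW' with h' | h'
                · exact h'
                · exact absurd h' huc
              have hnv : u ∉ vis :=
                fun h' => hnv' ((PySem.Set.mem_add vis c u).mpr (Or.inl h'))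
              obtain ⟨h1, h2⟩ := hcl u huW hnv
              exact ⟨fun e he => (PySem.Set.mem_add W c e).mpr (Or.inl (h1 e he)),
                fun t ht => (PySem.Set.mem_update T Y t).mpr (Or.inl (h2 t ht))⟩
          exact inner ch (pvTrigSetA cache c) (pvTrigSetA cache c) rfl

-- ---- visited-monotonicity of pvVisitB ----
lemma pvVisitB_vis_mono (g : List (String × List String)) (cache : List (String × Option String)) :
    ∀ fuel c st x, x ∈ st.1 → x ∈ (pvVisitB g cache fuel c st).1 := by
  intro fuel
  induction fuel with
  | zero => intro c st x hx; exact hx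
  | succ fuel ih =>
    intro c st x hx
    simp only [pvVisitB]
    split
    · exact hx
    · have hfold : ∀ (l : List String) (s : List String × List String), x ∈ s.1 →
          x ∈ (l.foldl (fun s d => pvVisitB g cache fuel d s) s).1 := by
        intro l
        induction l with
        | nil => intro s h; exact h
        | cons d l ihl => intro s h; exact ihl _ (ih d s x h)
      exact hfold _ _ ((PySem.Set.mem_add st.1 c x).mpr (Or.inl hx))

lemma pvFoldB_vis_mono (g : List (String × List String)) (cache : List (String × Option String))
    (fuel : Nat) :
    ∀ (ch : List String) (st : List String × List String) x, x ∈ st.1 →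
      x ∈ (ch.foldl (fun st c => pvVisitB g cache fuel c st) st).1 := by
  intro ch
  induction ch with
  | nil => intro st x hx; exact hx
  | cons d ch ihl => intro st x hx; exact ihl _ x (pvVisitB_vis_mono g cache fuel d st x hx)

lemma pvVisitB_mem_self (g : List (String × List String)) (cache : List (String × Option String))
    (fuel : Nat) (hf : 0 < fuel) (c : String) (st : List String × List String) :
    c ∈ (pvVisitB g cache fuel c st).1 := by
  cases fuel with
  | zero => omega
  | succ fuel =>
    simp only [pvVisitB]
    split
    · next h => exact List.contains_iff_mem.mp h
    · exact pvFoldB_vis_mono g cache fuel _ _ c ((PySem.Set.mem_add st.1 c c).mpr (Or.inr rfl))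

lemma pvFoldB_mem_children (g : List (String × List String)) (cache : List (String × Option String))
    (fuel : Nat) (hf : 0 < fuel) :
    ∀ (ch : List String) (st : List String × List String) (d : String), d ∈ ch →
      d ∈ (ch.foldl (fun st c => pvVisitB g cache fuel c st) st).1 := by
  intro ch
  induction ch with
  | nil => intro st d hd; exact absurd hd (List.not_mem_nil)
  | cons c ch ihl =>
    intro st d hd
    simp only [List.foldl_cons]
    rcases List.mem_cons.mp hd with rfl | hd
    · exact pvFoldB_vis_mono g cache fuel ch _ d (pvVisitB_mem_self g cache fuel hf d st)
    · exact ihl _ d hd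

-- ---- G: the main simulation lemma (pvVisitB against A's pvRecA) ----
lemma pvVisitB_spec (g : List (String × List String)) (cache : List (String × Option String)) :
    ∀ fuel (name : String) (vis trig : List String), pvMu g vis < fuel →
      (pvVisitB g cache fuel name (vis, trig)).2
          = PySem.Set.update trig (pvRecA g cache fuel name vis)
        ∧ (∀ x ∈ vis, x ∈ (pvVisitB g cache fuel name (vis, trig)).1)
        ∧ pvClosed g cache vis (pvVisitB g cache fuel name (vis, trig)).1
            (pvVisitB g cache fuel name (vis, trig)).2 := by
  intro fuel
  induction fuel with
  | zero => intro name vis trig h; omega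
  | succ fuel ih =>
    intro name vis trig hmu
    by_cases hnv : name ∈ vis
    · have hB : pvVisitB g cache (fuel + 1) name (vis, trig) = (vis, trig) := by
        simp only [pvVisitB]
        rw [if_pos (List.contains_iff_mem.mpr hnv)]
      have hA : pvRecA g cache (fuel + 1) name vis = PySem.Set.empty := by
        simp only [pvRecA]
        rw [if_pos (List.contains_iff_mem.mpr hnv)]
      rw [hB, hA, PySem.Set.empty_eq, PySem.Set.update_nil]
      exact ⟨rfl, fun x hx => hx, fun u hu hnu => absurd hu hnu⟩
    · cases hg : PySem.Dict.get? (⟨g⟩ : PySem.Dict String (List String)) name with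
      | none =>
        have hgetD : PySem.Dict.getD (⟨g⟩ : PySem.Dict String (List String)) name [] = [] := by
          rw [PySem.Dict.getD_eq_get?_getD, hg]; rfl
        have hB : pvVisitB g cache (fuel + 1) name (vis, trig)
            = (PySem.Set.add vis name, pvAddTrigB cache name trig) := by
          simp only [pvVisitB]
          rw [if_neg (by simpa using hnv), hgetD]
          rfl
        have hA : pvRecA g cache (fuel + 1) name vis = pvTrigSetA cache name := by
          simp only [pvRecA]
          rw [if_neg (by simpa using hnv), hg]
        rw [hB, hA]
        refine ⟨pvAddTrigB_eq cache name trig,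
          fun x hx => (PySem.Set.mem_add vis name x).mpr (Or.inl hx), ?_⟩
        intro u hu hnu
        have hun : u = name := by
          rcases (PySem.Set.mem_add vis name u).mp hu with h' | h'
          · exact absurd h' hnu
          · exact h'
        subst hun
        constructor
        · rw [pvSucc_of_get?_none hg]
          intro e he
          exact absurd he (List.not_mem_nil)
        · intro t ht
          rw [pvAddTrigB_eq cache u trig]
          exact (PySem.Set.mem_update trig _ t).mpr (Or.inr ht)
      | some ch =>
        have hgetD : PySem.Dict.getD (⟨g⟩ : PySem.Dict String (List String)) name [] = ch := by
          rw [PySem.Dict.getD_eq_get?_getD, hg]; rfl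
        have hkey : name ∈ pvKeys g := pvMem_keys_of_get?_some hg
        have hmu' : pvMu g (PySem.Set.add vis name) < fuel := by
          have h1 := pvMu_lt_of_add hkey hnv
          omega
        have hB : pvVisitB g cache (fuel + 1) name (vis, trig)
            = ch.foldl (fun st c => pvVisitB g cache fuel c st)
                (PySem.Set.add vis name, pvAddTrigB cache name trig) := by
          simp only [pvVisitB]
          rw [if_neg (by simpa using hnv), hgetD]
        have hA : pvRecA g cache (fuel + 1) name vis
            = ch.foldl (fun t d => PySem.Set.update t
                (pvRecA g cache fuel d (PySem.Set.add vis name))) (pvTrigSetA cache name) := by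
          simp only [pvRecA]
          rw [if_neg (by simpa using hnv), hg]
        set vis' := PySem.Set.add vis name with hv'
        have key : ∀ (l : List String), ∀ (V T X : List String),
            T = PySem.Set.update trig X →
            (∀ x ∈ vis', x ∈ V) →
            pvClosed g cache vis' V T →
            pvMu g V < fuel →
            (l.foldl (fun st c => pvVisitB g cache fuel c st) (V, T)).2
               = PySem.Set.update trig (l.foldl (fun t d => PySem.Set.update t
                   (pvRecA g cache fuel d vis')) X)
            ∧ (∀ x ∈ V, x ∈ (l.foldl (fun st c => pvVisitB g cache fuel c st) (V, T)).1)
            ∧ pvClosed g cache vis'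
                (l.foldl (fun st c => pvVisitB g cache fuel c st) (V, T)).1
                (l.foldl (fun st c => pvVisitB g cache fuel c st) (V, T)).2
            ∧ pvMu g (l.foldl (fun st c => pvVisitB g cache fuel c st) (V, T)).1 < fuel := by
          intro l
          induction l with
          | nil =>
            intro V T X hTX hsV hcl hmuV
            exact ⟨by simpa using hTX, fun x hx => hx, hcl, hmuV⟩
          | cons d l ihl =>
            intro V T X hTX hsV hcl hmuV
            obtain ⟨h1, h2, h3⟩ := ih d V T hmuV
            have hext := pvRecA_update_ext g cache fuel d vis' V T hsV hcl
            have hst2 : (pvVisitB g cache fuel d (V, T)).2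
                = PySem.Set.update trig (PySem.Set.update X (pvRecA g cache fuel d vis')) := by
              rw [h1, ← hext, hTX, ← pvUpdate_update]
            have hsV1 : ∀ x ∈ vis', x ∈ (pvVisitB g cache fuel d (V, T)).1 :=
              fun x hx => h2 x (hsV x hx)
            have hcl1 : pvClosed g cache vis' (pvVisitB g cache fuel d (V, T)).1
                (pvVisitB g cache fuel d (V, T)).2 := by
              intro u hu hnu
              by_cases huV : u ∈ V
              · obtain ⟨c1, c2⟩ := hcl u huV hnu
                exact ⟨fun e he => h2 e (c1 e he),
                  fun t ht => by
                    rw [h1]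
                    exact (PySem.Set.mem_update _ _ t).mpr (Or.inl (c2 t ht))⟩
              · exact h3 u hu huV
            have hmu1 : pvMu g (pvVisitB g cache fuel d (V, T)).1 < fuel :=
              lt_of_le_of_lt (pvMu_le_of_subset h2) hmuV
            obtain ⟨r1, r2, r3, r4⟩ := ihl (pvVisitB g cache fuel d (V, T)).1
              (pvVisitB g cache fuel d (V, T)).2
              (PySem.Set.update X (pvRecA g cache fuel d vis')) hst2 hsV1 hcl1 hmu1
            simp only [List.foldl_cons]
            exact ⟨r1, fun x hx => r2 x (h2 x hx), r3, r4⟩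
        obtain ⟨k1, k2, k3, -⟩ := key ch vis' (pvAddTrigB cache name trig) (pvTrigSetA cache name)
          (pvAddTrigB_eq cache name trig) (fun x hx => hx)
          (fun u hu hnu => absurd hu hnu) hmu'
        rw [hB, hA]
        refine ⟨k1, fun x hx => k2 x ((PySem.Set.mem_add vis name x).mpr (Or.inl hx)), ?_⟩
        intro u hu hnu
        by_cases hun : u = name
        · subst hun
          constructor
          · rw [pvSucc_of_get?_some hg]
            intro e he
            exact pvFoldB_mem_children g cache fuel (by omega) ch _ e he
          · intro t ht
            rw [k1]
            refine (PySem.Set.mem_update trig _ t).mpr (Or.inr ?_)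
            rw [pvMem_foldl_update (fun d => pvRecA g cache fuel d vis') ch (pvTrigSetA cache u) t]
            exact Or.inl ht
        · have hnu' : u ∉ vis' := by
            intro h'
            rcases (PySem.Set.mem_add vis name u).mp h' with h'' | h''
            · exact hnu h''
            · exact hun h''
          exact k3 u hu hnu'

-- ---- fuel-irrelevance of pvVisitB (any fuel above the measure gives the same run) ----
lemma pvVisitB_fuel_irrel (g : List (String × List String)) (cache : List (String × Option String)) :
    ∀ f1 f2 (c : String) (st : List String × List String),
      pvMu g st.1 < f1 → pvMu g st.1 < f2 →
      pvVisitB g cache f1 c st = pvVisitB g cache f2 c st := by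
  intro f1
  induction f1 with
  | zero => intro f2 c st h1 _; omega
  | succ f1 ih =>
    intro f2 c st h1 h2
    cases f2 with
    | zero => omega
    | succ f2 =>
      simp only [pvVisitB]
      split
      · rfl
      · next hc =>
        have hcv : c ∉ st.1 := by simpa using hc
        rcases hg : PySem.Dict.get? (⟨g⟩ : PySem.Dict String (List String)) c with _ | ch
        · have hd : PySem.Dict.getD (⟨g⟩ : PySem.Dict String (List String)) c [] = [] := by
            rw [PySem.Dict.getD_eq_get?_getD, hg]; rfl
          rw [hd]
          rfl
        · have hmu' : pvMu g (PySem.Set.add st.1 c) < pvMu g st.1 :=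
            pvMu_lt_of_add (pvMem_keys_of_get?_some hg) hcv
          have inner : ∀ (l : List String) (s : List String × List String),
              pvMu g s.1 < f1 → pvMu g s.1 < f2 →
              l.foldl (fun s d => pvVisitB g cache f1 d s) s
                = l.foldl (fun s d => pvVisitB g cache f2 d s) s := by
            intro l
            induction l with
            | nil => intro s _ _; rfl
            | cons d l ihl =>
              intro s hs1 hs2
              simp only [List.foldl_cons]
              rw [ih f2 d s hs1 hs2]
              have hmono : pvMu g (pvVisitB g cache f2 d s).1 ≤ pvMu g s.1 :=
                pvMu_le_of_subset (fun x hx => pvVisitB_vis_mono g cache f2 d s x hx)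
              exact ihl _ (by omega) (by omega)
          have hfst : (PySem.Set.add st.1 c, pvAddTrigB cache c st.2).1
              = PySem.Set.add st.1 c := rfl
          exact inner _ _ (by rw [hfst]; omega) (by rw [hfst]; omega)

-- ---- the stack loop flattens to a fold of pvVisitB ----
lemma pvLoopB_eq_foldl (g : List (String × List String)) (cache : List (String × Option String))
    (F : Nat) :
    ∀ (stack : List String) (st : List String × List String), pvMu g st.1 < F →
      pvLoopB g cache stack st = stack.foldl (fun st c => pvVisitB g cache F c st) st := by
  intro stack st
  induction stack, st using pvLoopB.induct g cache with
  | case1 st => intro _; rw [pvLoopB]; rfl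
  | case2 node rest st hc ih =>
    intro hF
    have hnv : node ∈ st.1 := List.contains_iff_mem.mp hc
    have hV : pvVisitB g cache F node st = st := by
      cases F with
      | zero => omega
      | succ F =>
        simp only [pvVisitB]
        rw [if_pos hc]
    rw [pvLoopB, dif_pos hc, List.foldl_cons, hV, ih hF]
  | case3 node rest st hc ih =>
    intro hF
    have hnv : node ∉ st.1 := by simpa using hc
    obtain ⟨F', rfl⟩ : ∃ F', F = F' + 1 := ⟨F - 1, by omega⟩
    set st' : List String × List String :=
      (PySem.Set.add st.1 node, pvAddTrigB cache node st.2) with hst'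
    have hle : pvMu g st'.1 ≤ pvMu g st.1 := pvMu_add_le st.1 node
    have hF' : pvMu g st'.1 < F' + 1 := lt_of_le_of_lt hle hF
    have hVB : pvVisitB g cache (F' + 1) node st
        = (PySem.Dict.getD ⟨g⟩ node []).foldl
            (fun s d => pvVisitB g cache F' d s) st' := by
      simp only [pvVisitB]
      rw [if_neg hc]
    have hFI : (PySem.Dict.getD (⟨g⟩ : PySem.Dict String (List String)) node []).foldl
          (fun s d => pvVisitB g cache F' d s) st'
        = (PySem.Dict.getD (⟨g⟩ : PySem.Dict String (List String)) node []).foldl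
          (fun s d => pvVisitB g cache (F' + 1) d s) st' := by
      rcases hg : PySem.Dict.get? (⟨g⟩ : PySem.Dict String (List String)) node with _ | ch
      · rw [PySem.Dict.getD_eq_get?_getD, hg]
        rfl
      · have hlt : pvMu g st'.1 < pvMu g st.1 :=
          pvMu_lt_of_add (pvMem_keys_of_get?_some hg) hnv
        have inner : ∀ (l : List String) (s : List String × List String),
            pvMu g s.1 < F' →
            l.foldl (fun s d => pvVisitB g cache F' d s) s
              = l.foldl (fun s d => pvVisitB g cache (F' + 1) d s) s := by
          intro l
          induction l with
          | nil => intro s _; rfl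
          | cons d l ihl =>
            intro s hs
            simp only [List.foldl_cons]
            rw [pvVisitB_fuel_irrel g cache F' (F' + 1) d s hs (by omega)]
            have hmono : pvMu g (pvVisitB g cache (F' + 1) d s).1 ≤ pvMu g s.1 :=
              pvMu_le_of_subset (fun x hx => pvVisitB_vis_mono g cache (F' + 1) d s x hx)
            exact ihl _ (by omega)
        exact inner _ _ (by omega)
    have hmu' : pvMu g (pvVisitB g cache (F' + 1) node st).1 ≤ pvMu g st.1 := by
      rcases hg : PySem.Dict.get? (⟨g⟩ : PySem.Dict String (List String)) node with _ | ch
      · have hd : PySem.Dict.getD (⟨g⟩ : PySem.Dict String (List String)) node [] = [] := by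
          rw [PySem.Dict.getD_eq_get?_getD, hg]; rfl
        rw [hVB, hd]
        exact hle
      · calc pvMu g (pvVisitB g cache (F' + 1) node st).1
            ≤ pvMu g st'.1 := by
              rw [hVB]
              exact pvMu_le_of_subset (fun x hx => pvFoldB_vis_mono g cache F' _ st' x hx)
          _ ≤ pvMu g st.1 := hle
    rw [pvLoopB, dif_neg hc, List.foldl_cons, ih hF', hVB, hFI, ← List.foldl_append]

-- ===== VERDICT (by name: the statement is the Claim_ definition above) =====
theorem get_reachable_archetypes_spec : Claim_equal_get_reachable_archetypes := by
  intro tech_name tech_graph archetype_cache visited _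
  unfold Spec_get_reachable_archetypes get_reachable_archetypes get_reachable_archetypes_alt
  have hmu : pvMu tech_graph (visited.getD PySem.Set.empty) < tech_graph.length + 1 := by
    have h1 : pvMu tech_graph (visited.getD PySem.Set.empty) ≤ (pvKeys tech_graph).length := by
      unfold pvMu
      exact List.length_filter_le _ _
    have h2 : (pvKeys tech_graph).length = tech_graph.length := by
      simp [pvKeys]
    omega
  rw [pvLoopB_eq_foldl tech_graph archetype_cache (tech_graph.length + 1) [tech_name]
    (visited.getD PySem.Set.empty, PySem.Set.empty) hmu]
  simp only [List.foldl_cons, List.foldl_nil]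
  obtain ⟨h1, -, -⟩ := pvVisitB_spec tech_graph archetype_cache (tech_graph.length + 1)
    tech_name (visited.getD PySem.Set.empty) PySem.Set.empty hmu
  rw [h1, PySem.Set.empty_eq, PySem.Set.update_nil_left,
    PySem.Set.ofList_eq_self_of_nodup _ (pvRecA_nodup tech_graph archetype_cache _ _ _)]
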